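-- pv_equiv track=rewrite | github.com/HenriqueZuffo/Jogo_Da_Forca | ValidaTentativasDesafiado/ValidateTentativas.py | Verifica_Achou_Todas_Letras
-- ===== SOURCE A (Python) =====
-- def Verifica_Achou_Todas_Letras(Letras_Encontradas):
--     vIndice_Letra = 0
--     vVeririficaLetras = ''
--
--     for vVeririficaLetras in Letras_Encontradas:
--         if vVeririficaLetras == 'S':
--             vIndice_Letra +=1
--         else:
--             vIndice_Letra -=1
--
--     if vIndice_Letra == len(Letras_Encontradas):
--         return True
--     else:
--         return False
-- ===== SOURCE B (Python) =====
-- def Verifica_Achou_Todas_Letras(Letras_Encontradas):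
--     return all(c == 'S' for c in Letras_Encontradas)
-- ===== Notes on version B (the rewrite author's own statement) =====
-- stated objective: idiomatic
-- what changed: Replaces the signed +1/-1 counter with final comparison against len() by a direct all(c == 'S') universal test with no accumulator, which short-circuits on the first non-'S' and avoids per-element Python-level arithmetic.
import Mathlib
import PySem

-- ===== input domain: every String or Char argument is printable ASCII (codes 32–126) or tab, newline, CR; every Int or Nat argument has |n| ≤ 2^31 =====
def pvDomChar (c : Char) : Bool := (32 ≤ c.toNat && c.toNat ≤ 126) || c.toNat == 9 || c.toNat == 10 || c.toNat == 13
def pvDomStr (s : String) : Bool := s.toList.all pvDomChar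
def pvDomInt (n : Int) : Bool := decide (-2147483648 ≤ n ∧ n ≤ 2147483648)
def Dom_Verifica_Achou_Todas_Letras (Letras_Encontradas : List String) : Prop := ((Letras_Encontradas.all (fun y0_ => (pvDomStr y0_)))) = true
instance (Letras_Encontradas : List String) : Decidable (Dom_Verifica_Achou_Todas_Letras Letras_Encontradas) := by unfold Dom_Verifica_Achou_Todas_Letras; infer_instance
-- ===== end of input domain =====

-- B replaces A's signed counter-and-length comparison by a direct short-circuiting
-- universal test `all(c == 'S')`; objective: idiomatic, same cost.

-- ===== PORT A =====
-- signed counter: +1 for 'S', -1 otherwise, then compared with the length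
def Verifica_Achou_Todas_Letras (Letras_Encontradas : List String) : Bool :=
  let vIndice_Letra : Int :=
    Letras_Encontradas.foldl
      (fun acc v => if v == "S" then acc + 1 else acc - 1) 0
  if vIndice_Letra == (Letras_Encontradas.length : Int) then true else false

-- ===== PORT B =====
def Verifica_Achou_Todas_Letras_alt (Letras_Encontradas : List String) : Bool :=
  Letras_Encontradas.all (fun c => c == "S")

-- ===== PRECONDITION & SPEC =====
def Spec_Verifica_Achou_Todas_Letras (Letras_Encontradas : List String) (out : Bool) : Prop := out = Verifica_Achou_Todas_Letras_alt Letras_Encontradas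
instance (Letras_Encontradas : List String) (out : Bool) : Decidable (Spec_Verifica_Achou_Todas_Letras Letras_Encontradas out) := by unfold Spec_Verifica_Achou_Todas_Letras; infer_instance

-- ===== CLAIM (what is proved, stated in full; the proofs are below) =====
def Claim_equal_Verifica_Achou_Todas_Letras : Prop := ∀ (Letras_Encontradas : List String), Dom_Verifica_Achou_Todas_Letras Letras_Encontradas → Spec_Verifica_Achou_Todas_Letras Letras_Encontradas (Verifica_Achou_Todas_Letras Letras_Encontradas)

-- ===== LEMMAS AND PROOFS =====
theorem vatl_foldl_le (xs : List String) (k : Int) :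
    xs.foldl (fun acc v => if v == "S" then acc + 1 else acc - 1) k ≤ k + xs.length := by
  induction xs generalizing k with
  | nil => simp
  | cons x xs ih =>
    simp only [List.foldl_cons, List.length_cons]
    split_ifs with h
    · have := ih (k + 1); push_cast; push_cast at this; omega
    · have := ih (k - 1); push_cast; push_cast at this; omega

theorem vatl_foldl_eq_iff (xs : List String) (k : Int) :
    (xs.foldl (fun acc v => if v == "S" then acc + 1 else acc - 1) k = k + xs.length)
      ↔ xs.all (fun c => c == "S") = true := by
  induction xs generalizing k with
  | nil => simp
  | cons x xs ih =>
    simp only [List.foldl_cons, List.all_cons, Bool.and_eq_true, List.length_cons]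
    split_ifs with h
    · have := ih (k + 1)
      constructor
      · intro he
        refine ⟨h, (this).mp ?_⟩
        push_cast at he ⊢; omega
      · intro ⟨_, ha⟩
        have := (this).mpr ha; push_cast at this ⊢; omega
    · constructor
      · intro he
        have hb := vatl_foldl_le xs (k - 1)
        push_cast at he hb; omega
      · intro ⟨hS, _⟩; exact absurd hS h

-- ===== VERDICT (by name: the statement is the Claim_ definition above) =====
theorem Verifica_Achou_Todas_Letras_spec : Claim_equal_Verifica_Achou_Todas_Letras := by
  intro xs _
  unfold Spec_Verifica_Achou_Todas_Letras Verifica_Achou_Todas_Letras Verifica_Achou_Todas_Letras_alt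
  have h := vatl_foldl_eq_iff xs 0
  simp only [zero_add, beq_iff_eq] at h
  simp only [beq_iff_eq]
  split_ifs with he
  · exact (h.mp he).symm
  · cases hb : xs.all (fun c => c == "S") with
    | true => exact absurd (h.mpr hb) he
    | false => rfl
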